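-- pv_equiv track=rewrite | github.com/loganthomas/python-practice | leet_code/divide_intervals.py | min_groups_1
-- ===== SOURCE A (Python) =====
-- import heapq
--
-- def min_groups_1(intervals):
--     intervals.sort()
--     pq = []
--     for start, end in intervals:
--         if pq and pq[0] < start:
--             heapq.heappop(pq)
--         heapq.heappush(pq, end)
--     return len(pq)
-- ===== SOURCE B (Python) =====
-- def min_groups_1(intervals):
--     # Counting instead of a priority queue: sort, then scan once keeping only a
--     # group counter and the plain list of end times seen so far.  An interval
--     # starting at s needs a new group exactly when the number of already-seen
--     # intervals still open at s (end >= s) reaches the current group count.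
--     intervals.sort()
--     ends = []
--     groups = 0
--     for s, e in intervals:
--         open_now = sum(1 for x in ends if x >= s)
--         if open_now >= groups:
--             groups += 1
--         ends.append(e)
--     return groups
-- ===== Notes on version B (the rewrite author's own statement) =====
-- stated objective: alternative
-- what changed: The priority-queue greedy (heap of group end times, pop-min/push per interval, answer = final heap size) is replaced by overlap counting: one sorted pass keeping only an integer group counter and the append-only list of end times seen so far, opening a new group exactly when the count of seen ends >= the current start reaches the counter; no heap, no deletions, no final measurement.
import Mathlib
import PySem

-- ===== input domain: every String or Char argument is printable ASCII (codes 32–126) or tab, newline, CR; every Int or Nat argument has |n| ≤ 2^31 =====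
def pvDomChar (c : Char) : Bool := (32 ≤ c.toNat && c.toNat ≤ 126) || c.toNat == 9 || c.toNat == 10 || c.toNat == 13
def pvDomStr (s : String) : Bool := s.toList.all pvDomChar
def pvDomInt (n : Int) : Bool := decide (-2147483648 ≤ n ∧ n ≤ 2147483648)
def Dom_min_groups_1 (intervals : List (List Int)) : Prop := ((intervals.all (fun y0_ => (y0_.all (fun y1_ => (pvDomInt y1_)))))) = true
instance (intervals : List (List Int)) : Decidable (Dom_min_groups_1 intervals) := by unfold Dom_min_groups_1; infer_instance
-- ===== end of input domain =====

-- B replaces A's pop/push min-heap greedy by pure counting: a running group counter plus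
-- the append-only list of ends seen so far (objective: alternative; not claimed faster).
-- Both A and B sort `intervals` in place; the equivalence proved here is about the return value.

-- ===== PORT A =====
-- heapq is not covered by PySem; the two calls are ported by their exact observable
-- semantics on a heap of Ints: pq[0] of a nonempty heap is its minimum value,
-- heapq.heappop removes one occurrence of that minimum, heapq.heappush adds its
-- argument.  The port keeps pq as the bag of pushed-not-yet-popped ends; every value
-- A's code observes (the truthiness of pq, the comparison pq[0] < start, len(pq))
-- is identical to CPython's, since equal Ints are indistinguishable.
def pqStepA (pq : List Int) (s e : Int) : List Int :=
  (match PySem.List.min? pq (fun x => x) with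
   | some m => if m < s then pq.erase m else pq
   | none => pq) ++ [e]

def min_groups_1 (intervals : List (List Int)) : Int :=
  ((PySem.List.sorted intervals (fun x => x) false).foldl
    (fun pq iv =>
      match iv with
      | [s, e] => pqStepA pq s e
      | _ => pq)    -- unreachable under Pre_ (Python raises ValueError on unpacking)
    ([] : List Int)).length

-- ===== PORT B =====
-- state = (ends seen so far, groups); open_now = sum(1 for x in ends if x >= s)
def bStep (st : List Int × Int) (s e : Int) : List Int × Int :=
  let open_now : Int := (st.1.countP (fun x => decide (s ≤ x)) : Int)
  (st.1 ++ [e], if st.2 ≤ open_now then st.2 + 1 else st.2)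

def min_groups_1_alt (intervals : List (List Int)) : Int :=
  ((PySem.List.sorted intervals (fun x => x) false).foldl
    (fun st iv =>
      if iv.length = 2 then bStep st (iv.getD 0 0) (iv.getD 1 0)
      else st)    -- unreachable under Pre_ (Python raises ValueError on unpacking)
    (([] : List Int), (0 : Int))).2

-- ===== PRECONDITION & SPEC =====
-- Pre_ excludes exactly the inputs on which Python raises: an element that is not a
-- 2-element list makes `for start, end in intervals` raise ValueError.
def Pre_min_groups_1 (intervals : List (List Int)) : Prop :=
  ∀ iv ∈ intervals, iv.length = 2
instance (intervals : List (List Int)) : Decidable (Pre_min_groups_1 intervals) := by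
  unfold Pre_min_groups_1; infer_instance

def pvWitness_min_groups_1 : List (List Int) := [[1, 3], [2, 4], [5, 1]]

def Spec_min_groups_1 (intervals : List (List Int)) (out : Int) : Prop := out = min_groups_1_alt intervals
instance (intervals : List (List Int)) (out : Int) : Decidable (Spec_min_groups_1 intervals out) := by unfold Spec_min_groups_1; infer_instance

-- ===== CLAIM (what is proved, stated in full; the proofs are below) =====
def Claim_equal_min_groups_1 : Prop := ∀ (intervals : List (List Int)), Dom_min_groups_1 intervals → Pre_min_groups_1 intervals → Spec_min_groups_1 intervals (min_groups_1 intervals)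

-- ===== LEMMAS AND PROOFS =====

-- appending the same element to both sides preserves the bag equation
theorem pvPermSnoc (x y z : List Int) (e : Int) (h : (x ++ y).Perm z) :
    ((x ++ [e]) ++ y).Perm (z ++ [e]) := by
  refine List.perm_iff_count.mpr (fun a => ?_)
  have h0 := h.count_eq a
  simp only [List.count_append] at h0 ⊢
  omega

-- moving one occurrence of m from the live part to the popped part
theorem pvPermErase (pq popped ends : List Int) (m : Int) (hmem : m ∈ pq)
    (h : (pq ++ popped).Perm ends) :
    (pq.erase m ++ (popped ++ [m])).Perm ends := by
  refine List.perm_iff_count.mpr (fun a => ?_)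
  have h0 := h.count_eq a
  have hcm : 0 < pq.count m := List.count_pos_iff.mpr hmem
  by_cases ha : a = m
  · subst ha
    have h1 : ([a] : List Int).count a = 1 := by simp
    simp only [List.count_append] at h0
    simp only [List.count_append, List.count_erase_self, h1]
    omega
  · simp only [List.count_append, List.count_erase_of_ne ha] at h0 ⊢
    have : [m].count a = 0 := by
      simp [List.count_singleton]
      omega
    omega

-- key simulation: processing the (lex-)sorted rest, A's heap pq and B's state
-- (ends, groups) stay related through the ghost list `popped` of ends A has popped:
--   ends ≡ pq ++ popped (as multisets), groups = |pq|, and every popped end is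
--   strictly below every start still to come.
theorem pvLoopSim (L : List (List Int)) (pq popped ends : List Int)
    (hall : ∀ iv ∈ L, iv.length = 2)
    (hperm : (pq ++ popped).Perm ends)
    (hpopped : ∀ x ∈ popped, ∀ iv ∈ L, ∀ s e : Int, iv = [s, e] → x < s)
    (hsorted : L.Pairwise (fun a b => ∀ s e s' e' : Int, a = [s, e] → b = [s', e'] → s ≤ s')) :
    ((L.foldl (fun pq iv => match iv with | [s, e] => pqStepA pq s e | _ => pq) pq).length : Int)
      = (L.foldl (fun st iv => if iv.length = 2 then bStep st (iv.getD 0 0) (iv.getD 1 0) else st) (ends, (pq.length : Int))).2 := by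
  induction L generalizing pq popped ends with
  | nil => simp
  | cons iv rest ih =>
      obtain ⟨s, e, rfl⟩ : ∃ s e : Int, iv = [s, e] := by
        have h2 : iv.length = 2 := hall iv (List.mem_cons_self)
        match iv, h2 with
        | [s, e], _ => exact ⟨s, e, rfl⟩
      have hall' : ∀ iv ∈ rest, iv.length = 2 := fun iv h => hall iv (List.mem_cons_of_mem _ h)
      have hsorted' : rest.Pairwise (fun a b => ∀ s e s' e' : Int, a = [s, e] → b = [s', e'] → s ≤ s') :=
        hsorted.of_cons
      have hhead : ∀ b ∈ rest, ∀ s' e' : Int, b = [s', e'] → s ≤ s' := by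
        intro b hb s' e' hbe
        exact (List.rel_of_pairwise_cons hsorted hb) s e s' e' rfl hbe
      -- count of seen ends ≥ s equals the count inside the live heap (popped ends are < s)
      have hcnt : ends.countP (fun x => decide (s ≤ x)) = pq.countP (fun x => decide (s ≤ x)) := by
        have h0 : popped.countP (fun x => decide (s ≤ x)) = 0 := by
          rw [List.countP_eq_zero]
          intro x hx
          have := hpopped x hx [s, e] (List.mem_cons_self) s e rfl
          simp
          omega
        have hc := hperm.countP_eq (fun x => decide (s ≤ x))
        rw [List.countP_append, h0] at hc
        omega
      simp only [List.foldl_cons]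
      have hiv : ∀ st : List Int × Int,
          (if ([s, e] : List Int).length = 2 then bStep st (([s, e] : List Int).getD 0 0) (([s, e] : List Int).getD 1 0) else st)
            = bStep st s e := fun st => rfl
      simp only [hiv]
      cases hmin : PySem.List.min? pq (fun x => x) with
      | none =>
          -- pq is empty: no pop, B increments from 0
          have hpq : pq = [] := (PySem.List.min?_eq_none_iff _ _).mp hmin
          subst hpq
          have hB : bStep (ends, (0 : Int)) s e = (ends ++ [e], 1) := by
            have hge : (0 : Int) ≤ ((ends.countP (fun x => decide (s ≤ x)) : Nat) : Int) := by positivity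
            simp [bStep, hge]
          have hA : pqStepA [] s e = [e] := by simp [pqStepA, hmin]
          simp only [List.length_nil, Nat.cast_zero, hA, hB]
          have hperm' : (([] ++ [e]) ++ popped).Perm (ends ++ [e]) := pvPermSnoc [] popped ends e hperm
          have hpop' : ∀ x ∈ popped, ∀ iv ∈ rest, ∀ s' e' : Int, iv = [s', e'] → x < s' :=
            fun x hx b hb s' e' hbe => hpopped x hx b (List.mem_cons_of_mem _ hb) s' e' hbe
          have happly := ih [e] popped (ends ++ [e]) hall' (by simpa using hperm') hpop' hsorted'
          simpa using happly
      | some m =>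
          have hmem : m ∈ pq := PySem.List.min?_mem hmin
          have hlow : ∀ y ∈ pq, m ≤ y := fun y hy => PySem.List.min?_isMin hmin y hy
          have hpqlen : 0 < pq.length := List.length_pos_of_mem hmem
          by_cases hlt : m < s
          · -- pop: A erases the minimum, B leaves the counter unchanged
            have hcntlt : pq.countP (fun x => decide (s ≤ x)) < pq.length := by
              rcases Nat.lt_or_ge (pq.countP (fun x => decide (s ≤ x))) pq.length with h | h
              · exact h
              · exfalso
                have heq : pq.countP (fun x => decide (s ≤ x)) = pq.length :=
                  le_antisymm List.countP_le_length h
                have := List.countP_eq_length.mp heq m hmem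
                simp at this
                omega
            have hA : pqStepA pq s e = pq.erase m ++ [e] := by simp [pqStepA, hmin, hlt]
            have hB : bStep (ends, (pq.length : Int)) s e = (ends ++ [e], (pq.length : Int)) := by
              have hngt : ¬ ((pq.length : Int) ≤ ((ends.countP (fun x => decide (s ≤ x)) : Nat) : Int)) := by
                rw [hcnt]
                omega
              simp [bStep, hngt]
            rw [hA, hB]
            have hperm' : ((pq.erase m ++ [e]) ++ (popped ++ [m])).Perm (ends ++ [e]) :=
              pvPermSnoc (pq.erase m) (popped ++ [m]) ends e (pvPermErase pq popped ends m hmem hperm)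
            have hpop' : ∀ x ∈ popped ++ [m], ∀ iv ∈ rest, ∀ s' e' : Int, iv = [s', e'] → x < s' := by
              intro x hx b hb s' e' hbe
              have hs' : s ≤ s' := hhead b hb s' e' hbe
              rcases List.mem_append.mp hx with hx | hx
              · exact hpopped x hx b (List.mem_cons_of_mem _ hb) s' e' hbe
              · simp at hx
                omega
            have happly := ih (pq.erase m ++ [e]) (popped ++ [m]) (ends ++ [e]) hall' hperm' hpop' hsorted'
            have hlen' : (((pq.erase m ++ [e]).length : Nat) : Int) = (pq.length : Int) := by
              rw [List.length_append, List.length_erase_of_mem hmem]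
              simp only [List.length_cons, List.length_nil]
              omega
            rw [hlen'] at happly
            exact happly
          · -- no pop: A pushes, B increments
            have hcnteq : pq.countP (fun x => decide (s ≤ x)) = pq.length := by
              apply List.countP_eq_length.mpr
              intro a ha
              have := hlow a ha
              simp
              omega
            have hA : pqStepA pq s e = pq ++ [e] := by simp [pqStepA, hmin, hlt]
            have hB : bStep (ends, (pq.length : Int)) s e = (ends ++ [e], (pq.length : Int) + 1) := by
              have hge : ((pq.length : Int) ≤ ((ends.countP (fun x => decide (s ≤ x)) : Nat) : Int)) := by
                rw [hcnt, hcnteq]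
              simp [bStep, hge]
            rw [hA, hB]
            have hperm' : ((pq ++ [e]) ++ popped).Perm (ends ++ [e]) := pvPermSnoc pq popped ends e hperm
            have hpop' : ∀ x ∈ popped, ∀ iv ∈ rest, ∀ s' e' : Int, iv = [s', e'] → x < s' :=
              fun x hx b hb s' e' hbe => hpopped x hx b (List.mem_cons_of_mem _ hb) s' e' hbe
            have happly := ih (pq ++ [e]) popped (ends ++ [e]) hall' hperm' hpop' hsorted'
            have hlen' : (((pq ++ [e]).length : Nat) : Int) = (pq.length : Int) + 1 := by
              simp
            rw [hlen'] at happly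
            exact happly

-- the port's `sorted` (default List LT instance) is the LinearOrder one (Subsingleton of Decidable)
theorem pvSortedBridge (intervals : List (List Int)) :
    (PySem.List.sorted intervals (fun x => x) false)
    = (@PySem.List.sorted (List Int) (List Int) List.instLinearOrder.toLT LinearOrder.toDecidableLT intervals (fun x => x) false) := by
  have hD : (fun (a b : List Int) => a.decidableLT b) = (LinearOrder.toDecidableLT (α := List Int)) := by
    funext a b
    exact Subsingleton.elim _ _
  exact congrArg (fun d => @PySem.List.sorted (List Int) (List Int) List.instLT d intervals (fun x => x) false) hD

-- the lex-sorted list has nondecreasing starts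
theorem pvSortedStarts (intervals : List (List Int)) :
    (PySem.List.sorted intervals (fun x => x) false).Pairwise
      (fun a b => ∀ s e s' e' : Int, a = [s, e] → b = [s', e'] → s ≤ s') := by
  rw [pvSortedBridge]
  have h := PySem.List.sorted_pairwise intervals (fun x => x)
  refine h.imp ?_
  intro a b hab s e s' e' ha hb
  subst ha
  subst hb
  by_contra hc
  rw [not_le] at hc
  have hlt : ([s', e'] : List Int) < [s, e] := List.Lex.rel hc
  exact absurd hab (not_le.mpr hlt)

-- ===== VERDICT (by name: the statement is the Claim_ definition above) =====
theorem min_groups_1_spec : Claim_equal_min_groups_1 := by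
  intro intervals _hdom hpre
  unfold Spec_min_groups_1 min_groups_1 min_groups_1_alt
  have hall : ∀ iv ∈ PySem.List.sorted intervals (fun x => x) false, iv.length = 2 :=
    fun iv h => hpre iv ((PySem.List.mem_sorted _ _ _ _).mp h)
  have := pvLoopSim (PySem.List.sorted intervals (fun x => x) false) [] [] [] hall
    (List.Perm.refl _) (by simp) (pvSortedStarts intervals)
  simpa using this
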